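-- pv_equiv track=rewrite | github.com/Sami-hat/query-optimiser | src/recommender.py | _order_columns_for_index
-- ===== SOURCE A (Python) =====
-- from typing import List, Dict, Any, Optional
--
-- def _order_columns_for_index(
--
--     columns: List[str],
--     predicate_types: Dict[str, str],
--     order_by_columns: Optional[List[str]] = None
-- ) -> List[str]:
--     """
--     Order columns optimally for composite index.
--
--     Rule: Equality predicates > Range predicates > ORDER BY columns
--
--     Args:
--         columns: List of column names
--         predicate_types: Dict mapping column to predicate type ('equality', 'range', 'other')
--         order_by_columns: Optional list of ORDER BY columns
--
--     Returns:
--         Optimally ordered list of columns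
--     """
--     if len(columns) <= 1:
--         return columns
--
--     # Categorize columns
--     equality_cols = []
--     range_cols = []
--     other_cols = []
--
--     for col in columns:
--         pred_type = predicate_types.get(col, 'other')
--         if pred_type == 'equality':
--             equality_cols.append(col)
--         elif pred_type == 'range':
--             range_cols.append(col)
--         else:
--             other_cols.append(col)
--
--     # Optimal order: equality first, range next, others last
--     ordered = equality_cols + range_cols + other_cols
--
--     # Add ORDER BY columns at the end if not already included
--     if order_by_columns:
--         for col in order_by_columns:
--             if col not in ordered:
--                 ordered.append(col)
--
--     return ordered
-- ===== SOURCE B (Python) =====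
-- from typing import List, Dict, Optional
--
-- def _order_columns_for_index(
--     columns: List[str],
--     predicate_types: Dict[str, str],
--     order_by_columns: Optional[List[str]] = None
-- ) -> List[str]:
--     if len(columns) <= 1:
--         return columns
--
--     # One stable sort by rank replaces the three-bucket categorization loop:
--     # equal ranks keep input order, so this equals equality+range+other concatenation.
--     def rank(col):
--         t = predicate_types.get(col, 'other')
--         if t == 'equality':
--             return 0
--         if t == 'range':
--             return 1
--         return 2
--
--     ordered = sorted(columns, key=rank)
--
--     if order_by_columns:
--         for col in order_by_columns:
--             if col not in ordered:
--                 ordered.append(col)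
--
--     return ordered
-- ===== Notes on version B (the rewrite author's own statement) =====
-- stated objective: simpler
-- what changed: Replaces the three-bucket categorization loop and concatenation with a single stable sort by a rank key (equality=0, range=1, other=2); stability makes the result identical.
import Mathlib
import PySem

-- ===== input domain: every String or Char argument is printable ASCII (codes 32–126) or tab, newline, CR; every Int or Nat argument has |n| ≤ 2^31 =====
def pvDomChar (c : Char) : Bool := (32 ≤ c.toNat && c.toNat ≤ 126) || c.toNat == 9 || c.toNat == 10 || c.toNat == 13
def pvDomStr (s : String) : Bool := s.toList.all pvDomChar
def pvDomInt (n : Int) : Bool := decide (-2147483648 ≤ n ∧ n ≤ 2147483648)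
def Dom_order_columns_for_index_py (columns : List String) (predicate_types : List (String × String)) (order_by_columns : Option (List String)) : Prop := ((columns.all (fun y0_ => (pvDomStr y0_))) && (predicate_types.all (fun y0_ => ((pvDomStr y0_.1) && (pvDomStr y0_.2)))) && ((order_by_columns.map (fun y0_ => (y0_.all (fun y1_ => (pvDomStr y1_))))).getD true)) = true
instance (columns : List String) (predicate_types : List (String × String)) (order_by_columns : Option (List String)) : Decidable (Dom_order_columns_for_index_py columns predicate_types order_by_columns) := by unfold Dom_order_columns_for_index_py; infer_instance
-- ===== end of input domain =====

-- B replaces A's three-bucket categorization loop with one stable sort by a rank key; same result, simpler structure.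


-- ===== PORT A =====
-- A's categorization loop: append each column to the equality / range / other bucket
def pvBuckets (predicate_types : List (String × String)) (columns : List String) :
    List String × List String × List String :=
  columns.foldl
    (fun (acc : List String × List String × List String) col =>
      let pred_type := PySem.Dict.getD (PySem.Dict.mk predicate_types) col "other"
      if pred_type == "equality" then (acc.1 ++ [col], acc.2.1, acc.2.2)
      else if pred_type == "range" then (acc.1, acc.2.1 ++ [col], acc.2.2)
      else (acc.1, acc.2.1, acc.2.2 ++ [col]))
    ([], [], [])

-- 'ordered = equality_cols + range_cols + other_cols'
def pvCat (t : List String × List String × List String) : List String := t.1 ++ t.2.1 ++ t.2.2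

-- literal transliteration of A: bucket the columns, concatenate, then append missing ORDER BY columns
def order_columns_for_index_py (columns : List String) (predicate_types : List (String × String)) (order_by_columns : Option (List String)) : List String :=
  if columns.length ≤ 1 then columns
  else
    match order_by_columns with
    | none => pvCat (pvBuckets predicate_types columns)
    | some obs => obs.foldl (fun acc col => if col ∈ acc then acc else acc ++ [col])
        (pvCat (pvBuckets predicate_types columns))

-- ===== PORT B =====
-- B's rank key: equality → 0, range → 1, everything else → 2
def pvRank (predicate_types : List (String × String)) (col : String) : Nat :=
  let t := PySem.Dict.getD (PySem.Dict.mk predicate_types) col "other"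
  if t == "equality" then 0
  else if t == "range" then 1
  else 2

-- literal transliteration of B: one stable sort by rank, then the same ORDER BY append loop
def order_columns_for_index_py_alt (columns : List String) (predicate_types : List (String × String)) (order_by_columns : Option (List String)) : List String :=
  if columns.length ≤ 1 then columns
  else
    match order_by_columns with
    | none => PySem.List.sorted columns (pvRank predicate_types) false
    | some obs => obs.foldl (fun acc col => if col ∈ acc then acc else acc ++ [col])
        (PySem.List.sorted columns (pvRank predicate_types) false)

-- ===== PRECONDITION & SPEC =====
def Spec_order_columns_for_index_py (columns : List String) (predicate_types : List (String × String)) (order_by_columns : Option (List String)) (out : List String) : Prop := out = order_columns_for_index_py_alt columns predicate_types order_by_columns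
instance (columns : List String) (predicate_types : List (String × String)) (order_by_columns : Option (List String)) (out : List String) : Decidable (Spec_order_columns_for_index_py columns predicate_types order_by_columns out) := by unfold Spec_order_columns_for_index_py; infer_instance

-- ===== CLAIM (what is proved, stated in full; the proofs are below) =====
def Claim_equal_order_columns_for_index_py : Prop := ∀ (columns : List String) (predicate_types : List (String × String)) (order_by_columns : Option (List String)), Dom_order_columns_for_index_py columns predicate_types order_by_columns → Spec_order_columns_for_index_py columns predicate_types order_by_columns (order_columns_for_index_py columns predicate_types order_by_columns)

-- ===== LEMMAS AND PROOFS =====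

theorem insertBy_cons_of_all_before {α : Type} (b : α → α → Bool) (x : α) (s : List α)
    (h : ∀ y ∈ s, b x y = true) : PySem.List.insertBy b x s = x :: s := by
  cases s with
  | nil => rfl
  | cons y ys => simp [PySem.List.insertBy, h y (by simp)]

theorem insertBy_append_of_not {α : Type} (b : α → α → Bool) (x : α) (p s : List α)
    (h : ∀ y ∈ p, b x y = false) :
    PySem.List.insertBy b x (p ++ s) = p ++ PySem.List.insertBy b x s := by
  induction p with
  | nil => rfl
  | cons y p' ih =>
    have hy : b x y = false := h y (by simp)
    simp only [List.cons_append, PySem.List.insertBy, hy]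
    simp only [Bool.false_eq_true, if_false]
    rw [ih (fun z hz => h z (by simp [hz]))]

-- A's bucket fold (from any well-ranked state) concatenated = the stable insertion-sort fold by rank
theorem bucket_eq_insert (pt : List (String × String)) (xs : List String)
    (e r o : List String)
    (he : ∀ y ∈ e, pvRank pt y = 0) (hr : ∀ y ∈ r, pvRank pt y = 1) (ho : ∀ y ∈ o, pvRank pt y = 2) :
    pvCat (xs.foldl
      (fun (acc : List String × List String × List String) col =>
        let pred_type := PySem.Dict.getD (PySem.Dict.mk pt) col "other"
        if pred_type == "equality" then (acc.1 ++ [col], acc.2.1, acc.2.2)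
        else if pred_type == "range" then (acc.1, acc.2.1 ++ [col], acc.2.2)
        else (acc.1, acc.2.1, acc.2.2 ++ [col])) (e, r, o))
    = xs.foldl (fun acc x => PySem.List.insertBy (fun a b => decide (pvRank pt a < pvRank pt b)) x acc) (e ++ r ++ o) := by
  induction xs generalizing e r o with
  | nil => rfl
  | cons x xs ih =>
    simp only [List.foldl_cons]
    by_cases h0 : PySem.Dict.getD (PySem.Dict.mk pt) x "other" == "equality"
    · rw [show (if (PySem.Dict.getD (PySem.Dict.mk pt) x "other") == "equality" then (e ++ [x], r, o)
            else if (PySem.Dict.getD (PySem.Dict.mk pt) x "other") == "range" then (e, r ++ [x], o)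
            else (e, r, o ++ [x])) = (e ++ [x], r, o) from by simp [h0]]
      have hx : pvRank pt x = 0 := by simp [pvRank, h0]
      have hins : PySem.List.insertBy (fun a b => decide (pvRank pt a < pvRank pt b)) x (e ++ r ++ o)
          = (e ++ [x]) ++ r ++ o := by
        rw [List.append_assoc,
          insertBy_append_of_not _ _ e (r ++ o) (fun y hy => by simp [hx, he y hy]),
          insertBy_cons_of_all_before _ _ (r ++ o) (fun y hy => by
            rcases List.mem_append.mp hy with hy | hy
            · simp [hx, hr y hy]
            · simp [hx, ho y hy])]
        simp
      rw [hins]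
      exact ih (e ++ [x]) r o
        (fun y hy => by
          rcases List.mem_append.mp hy with hy | hy
          · exact he y hy
          · simp_all)
        hr ho
    · by_cases h1 : PySem.Dict.getD (PySem.Dict.mk pt) x "other" == "range"
      · rw [show (if (PySem.Dict.getD (PySem.Dict.mk pt) x "other") == "equality" then (e ++ [x], r, o)
              else if (PySem.Dict.getD (PySem.Dict.mk pt) x "other") == "range" then (e, r ++ [x], o)
              else (e, r, o ++ [x])) = (e, r ++ [x], o) from by simp [h0, h1]]
        have hx : pvRank pt x = 1 := by simp [pvRank, h0, h1]
        have hins : PySem.List.insertBy (fun a b => decide (pvRank pt a < pvRank pt b)) x (e ++ r ++ o)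
            = e ++ (r ++ [x]) ++ o := by
          rw [insertBy_append_of_not _ _ (e ++ r) o (fun y hy => by
              rcases List.mem_append.mp hy with hy | hy
              · simp [hx, he y hy]
              · simp [hx, hr y hy]),
            insertBy_cons_of_all_before _ _ o (fun y hy => by simp [hx, ho y hy])]
          simp
        rw [hins]
        exact ih e (r ++ [x]) o he
          (fun y hy => by
            rcases List.mem_append.mp hy with hy | hy
            · exact hr y hy
            · simp_all)
          ho
      · rw [show (if (PySem.Dict.getD (PySem.Dict.mk pt) x "other") == "equality" then (e ++ [x], r, o)
              else if (PySem.Dict.getD (PySem.Dict.mk pt) x "other") == "range" then (e, r ++ [x], o)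
              else (e, r, o ++ [x])) = (e, r, o ++ [x]) from by simp [h0, h1]]
        have hx : pvRank pt x = 2 := by simp [pvRank, h0, h1]
        have hins : PySem.List.insertBy (fun a b => decide (pvRank pt a < pvRank pt b)) x (e ++ r ++ o)
            = e ++ r ++ (o ++ [x]) := by
          rw [PySem.List.insertBy_of_forall_not_before _ _ _ (fun y hy => by
            rcases List.mem_append.mp hy with hy | hy
            · rcases List.mem_append.mp hy with hy | hy
              · simp [hx, he y hy]
              · simp [hx, hr y hy]
            · simp [hx, ho y hy])]
          simp
        rw [hins]
        exact ih e r (o ++ [x]) he hr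
          (fun y hy => by
            rcases List.mem_append.mp hy with hy | hy
            · exact ho y hy
            · simp_all)

theorem cat_buckets_eq_sorted (pt : List (String × String)) (columns : List String) :
    pvCat (pvBuckets pt columns) = PySem.List.sorted columns (pvRank pt) false := by
  rw [PySem.List.sorted_eq_foldl_insertBy]
  have key := bucket_eq_insert pt columns [] [] [] (by simp) (by simp) (by simp)
  simpa [pvBuckets] using key

-- ===== VERDICT (by name: the statement is the Claim_ definition above) =====
theorem order_columns_for_index_py_spec : Claim_equal_order_columns_for_index_py := by
  intro columns predicate_types order_by_columns _
  unfold Spec_order_columns_for_index_py order_columns_for_index_py order_columns_for_index_py_alt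
  by_cases hlen : columns.length ≤ 1
  · simp [hlen]
  · cases order_by_columns <;>
      simp only [hlen, if_false] <;>
      rw [cat_buckets_eq_sorted]
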